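-- pv_equiv track=rewrite | github.com/bjarki596-hue/Aisupea | tools/__init__.py | _analyze_command
-- ===== SOURCE A (Python) =====
-- from typing import Dict, List, Any, Optional, Callable, Union
--
-- def _analyze_command(command: str) -> Optional[str]:
--     """Analyze command to determine which tool to use."""
--     command_lower = command.lower()
--
--     # Simple keyword-based routing
--     if any(kw in command_lower for kw in ['run', 'execute', 'python', 'code']):
--         return 'python_executor'
--     elif any(kw in command_lower for kw in ['bash', 'shell', 'command', 'terminal']):
--         return 'bash_executor'
--     elif any(kw in command_lower for kw in ['file', 'read', 'write', 'list', 'delete']):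
--         return 'filesystem'
--     elif any(kw in command_lower for kw in ['analyze', 'project', 'structure', 'dependencies']):
--         return 'project_analyzer'
--     elif any(kw in command_lower for kw in ['search', 'find', 'grep']):
--         return 'code_search'
--
--     return None
-- ===== SOURCE B (Python) =====
-- # Position-driven scan: slide over the command once and test the flat keyword
-- # dictionary at each position, keeping the minimum tool priority seen.
-- from typing import Optional
--
-- _KEYWORDS = {
--     'run': 0, 'execute': 0, 'python': 0, 'code': 0,
--     'bash': 1, 'shell': 1, 'command': 1, 'terminal': 1,
--     'file': 2, 'read': 2, 'write': 2, 'list': 2, 'delete': 2,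
--     'analyze': 3, 'project': 3, 'structure': 3, 'dependencies': 3,
--     'search': 4, 'find': 4, 'grep': 4,
-- }
-- _TOOLS = ['python_executor', 'bash_executor', 'filesystem',
--           'project_analyzer', 'code_search']
--
-- def _analyze_command(command: str) -> Optional[str]:
--     cl = command.lower()
--     best = len(_TOOLS)
--     for i in range(len(cl)):
--         for kw, prio in _KEYWORDS.items():
--             if prio < best and cl.startswith(kw, i):
--                 best = prio
--     return _TOOLS[best] if best < len(_TOOLS) else None
-- ===== Notes on version B (the rewrite author's own statement) =====
-- stated objective: alternative
-- what changed: Instead of testing each keyword group with substring membership in a fixed cascade, B slides over the lowered command once and, at each position, checks the flat keyword->priority dictionary with startswith, keeping the minimum matched priority and indexing the tool table at the end.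
import Mathlib
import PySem

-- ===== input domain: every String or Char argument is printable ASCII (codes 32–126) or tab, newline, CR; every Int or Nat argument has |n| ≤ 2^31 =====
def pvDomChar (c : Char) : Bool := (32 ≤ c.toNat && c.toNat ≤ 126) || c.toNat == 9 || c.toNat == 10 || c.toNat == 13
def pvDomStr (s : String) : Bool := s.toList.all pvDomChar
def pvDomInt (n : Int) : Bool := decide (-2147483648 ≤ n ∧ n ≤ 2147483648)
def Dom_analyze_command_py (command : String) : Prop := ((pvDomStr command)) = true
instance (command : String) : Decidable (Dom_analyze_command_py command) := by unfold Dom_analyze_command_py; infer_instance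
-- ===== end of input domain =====

-- B replaces the keyword-group cascade by a single left-to-right position scan
-- of the lowered command against a flat keyword->priority table (alternative).

-- ===== PORT A =====
-- Port of A: if/elif cascade of any-keyword substring tests.
def analyze_command_py (command : String) : Option String :=
  let command_lower := PySem.Str.lower command
  if ["run", "execute", "python", "code"].any (fun kw => PySem.Str.isIn kw command_lower) then
    some "python_executor"
  else if ["bash", "shell", "command", "terminal"].any (fun kw => PySem.Str.isIn kw command_lower) then
    some "bash_executor"
  else if ["file", "read", "write", "list", "delete"].any (fun kw => PySem.Str.isIn kw command_lower) then
    some "filesystem"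
  else if ["analyze", "project", "structure", "dependencies"].any (fun kw => PySem.Str.isIn kw command_lower) then
    some "project_analyzer"
  else if ["search", "find", "grep"].any (fun kw => PySem.Str.isIn kw command_lower) then
    some "code_search"
  else
    none

-- ===== PORT B =====
-- Flat keyword -> priority table (Python's _KEYWORDS dict, in insertion order).
def pvKWS : List (String × Nat) :=
  [("run", 0), ("execute", 0), ("python", 0), ("code", 0),
   ("bash", 1), ("shell", 1), ("command", 1), ("terminal", 1),
   ("file", 2), ("read", 2), ("write", 2), ("list", 2), ("delete", 2),
   ("analyze", 3), ("project", 3), ("structure", 3), ("dependencies", 3),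
   ("search", 4), ("find", 4), ("grep", 4)]

def pvTOOLS : List String :=
  ["python_executor", "bash_executor", "filesystem", "project_analyzer", "code_search"]

-- Port of B: slide over positions of the lowered command; at each position test the
-- keyword table with startswith (cl.startswith(kw, i) = kw is a prefix of cl[i:],
-- exact here since 0 ≤ i ≤ len(cl)); keep the minimum matched priority.
def analyze_command_py_alt (command : String) : Option String :=
  let cl := PySem.Chars.lower command.toList
  let best := (List.range cl.length).foldl
    (fun b i => pvKWS.foldl
      (fun b' kp => if kp.2 < b' ∧ PySem.Chars.startswith (cl.drop i) kp.1.toList then kp.2 else b') b)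
    pvTOOLS.length
  if best < pvTOOLS.length then pvTOOLS[best]? else none

-- ===== PRECONDITION & SPEC =====
def Spec_analyze_command_py (command : String) (out : Option String) : Prop := out = analyze_command_py_alt command
instance (command : String) (out : Option String) : Decidable (Spec_analyze_command_py command out) := by unfold Spec_analyze_command_py; infer_instance

-- ===== CLAIM =====
def Claim_equal_analyze_command_py : Prop := ∀ (command : String), Dom_analyze_command_py command → Spec_analyze_command_py command (analyze_command_py command)

-- ===== LEMMAS AND PROOFS =====

-- Inner fold over the keyword table: result is ≤ the start value, is either the
-- start value or the priority of a matched entry, and is ≤ every matched priority.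
theorem pv_inner_spec (p : String → Bool) (L : List (String × Nat)) (b0 : Nat) :
    (L.foldl (fun b kp => if kp.2 < b ∧ p kp.1 then kp.2 else b) b0) ≤ b0 ∧
    ((L.foldl (fun b kp => if kp.2 < b ∧ p kp.1 then kp.2 else b) b0) = b0 ∨
      ∃ kp ∈ L, p kp.1 = true ∧ (L.foldl (fun b kp => if kp.2 < b ∧ p kp.1 then kp.2 else b) b0) = kp.2) ∧
    (∀ kp ∈ L, p kp.1 = true → (L.foldl (fun b kp => if kp.2 < b ∧ p kp.1 then kp.2 else b) b0) ≤ kp.2) := by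
  induction L generalizing b0 with
  | nil => simp
  | cons x xs ih =>
    simp only [List.foldl_cons]
    by_cases hc : x.2 < b0 ∧ p x.1 = true
    · rw [if_pos hc]
      obtain ⟨ih1, ih2, ih3⟩ := ih x.2
      refine ⟨ih1.trans (Nat.le_of_lt hc.1), ?_, ?_⟩
      · rcases ih2 with h | ⟨kp, hm, hp, he⟩
        · exact Or.inr ⟨x, List.mem_cons_self, hc.2, h⟩
        · exact Or.inr ⟨kp, List.mem_cons_of_mem _ hm, hp, he⟩
      · intro kp hm hp
        rcases List.mem_cons.mp hm with rfl | hm'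
        · exact ih1
        · exact ih3 kp hm' hp
    · rw [if_neg hc]
      obtain ⟨ih1, ih2, ih3⟩ := ih b0
      refine ⟨ih1, ?_, ?_⟩
      · rcases ih2 with h | ⟨kp, hm, hp, he⟩
        · exact Or.inl h
        · exact Or.inr ⟨kp, List.mem_cons_of_mem _ hm, hp, he⟩
      · intro kp hm hp
        rcases List.mem_cons.mp hm with rfl | hm'
        · rcases Decidable.not_and_iff_or_not.mp hc with h' | h'
          · omega
          · exact absurd hp h'
        · exact ih3 kp hm' hp

-- Outer fold over positions: same three facts lifted over range n.
theorem pv_outer_spec (cl : List Char) (n b0 : Nat) :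
    ((List.range n).foldl
      (fun b i => pvKWS.foldl
        (fun b' kp => if kp.2 < b' ∧ PySem.Chars.startswith (cl.drop i) kp.1.toList then kp.2 else b') b) b0) ≤ b0 ∧
    (((List.range n).foldl
      (fun b i => pvKWS.foldl
        (fun b' kp => if kp.2 < b' ∧ PySem.Chars.startswith (cl.drop i) kp.1.toList then kp.2 else b') b) b0) = b0 ∨
      ∃ i < n, ∃ kp ∈ pvKWS, PySem.Chars.startswith (cl.drop i) kp.1.toList = true ∧
        ((List.range n).foldl
          (fun b i => pvKWS.foldl
            (fun b' kp => if kp.2 < b' ∧ PySem.Chars.startswith (cl.drop i) kp.1.toList then kp.2 else b') b) b0) = kp.2) ∧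
    (∀ i < n, ∀ kp ∈ pvKWS, PySem.Chars.startswith (cl.drop i) kp.1.toList = true →
      ((List.range n).foldl
        (fun b i => pvKWS.foldl
          (fun b' kp => if kp.2 < b' ∧ PySem.Chars.startswith (cl.drop i) kp.1.toList then kp.2 else b') b) b0) ≤ kp.2) := by
  induction n generalizing b0 with
  | zero => simp
  | succ n ih =>
    rw [List.range_succ, List.foldl_append, List.foldl_cons, List.foldl_nil]
    obtain ⟨ih1, ih2, ih3⟩ := ih b0
    obtain ⟨s1, s2, s3⟩ := pv_inner_spec (fun s => PySem.Chars.startswith (cl.drop n) s.toList) pvKWS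
      ((List.range n).foldl
        (fun b i => pvKWS.foldl
          (fun b' kp => if kp.2 < b' ∧ PySem.Chars.startswith (cl.drop i) kp.1.toList then kp.2 else b') b) b0)
    refine ⟨s1.trans ih1, ?_, ?_⟩
    · rcases s2 with h | ⟨kp, hm, hp, he⟩
      · rw [h]
        rcases ih2 with h2 | ⟨i, hi, kp, hm, hp, he⟩
        · exact Or.inl h2
        · exact Or.inr ⟨i, Nat.lt_succ_of_lt hi, kp, hm, hp, he⟩
      · exact Or.inr ⟨n, Nat.lt_succ_self n, kp, hm, hp, he⟩
    · intro i hi kp hm hp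
      rcases Nat.lt_succ_iff_lt_or_eq.mp hi with h | rfl
      · exact s1.trans (ih3 i h kp hm hp)
      · exact s3 kp hm hp

-- A keyword occurs as a substring iff it starts at some position strictly inside the string.
theorem pv_bridge (cl kw : List Char) (hk : kw ≠ []) :
    (∃ i, i < cl.length ∧ PySem.Chars.startswith (cl.drop i) kw = true) ↔
      PySem.Chars.isIn kw cl = true := by
  rw [← PySem.Chars.exists_prefix_drop_iff_isIn]
  constructor
  · rintro ⟨i, _, h⟩
    exact ⟨i, (PySem.Chars.startswith_iff (cl.drop i) kw).mp h⟩
  · rintro ⟨j, h⟩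
    by_cases hj : j < cl.length
    · exact ⟨j, hj, (PySem.Chars.startswith_iff (cl.drop j) kw).mpr h⟩
    · rw [List.drop_eq_nil_of_le (Nat.le_of_not_lt hj)] at h
      exact absurd (List.prefix_nil.mp h) hk

theorem analyze_command_py_spec : Claim_equal_analyze_command_py := by
  intro command _
  show analyze_command_py command = analyze_command_py_alt command
  unfold analyze_command_py analyze_command_py_alt
  simp only [PySem.Str.isIn_eq, PySem.Str.toList_lower]
  generalize PySem.Chars.lower command.toList = cl
  obtain ⟨hb5, hP1, hP2⟩ := pv_outer_spec cl cl.length pvTOOLS.length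
  set best := (List.range cl.length).foldl
    (fun b i => pvKWS.foldl
      (fun b' kp => if kp.2 < b' ∧ PySem.Chars.startswith (cl.drop i) kp.1.toList then kp.2 else b') b)
    pvTOOLS.length with hbest
  -- best is at most the priority of any keyword occurring in cl
  have key1 : ∀ kp ∈ pvKWS, PySem.Chars.isIn kp.1.toList cl = true → best ≤ kp.2 := by
    intro kp hm hin
    have hk : kp.1.toList ≠ [] := by fin_cases hm <;> decide
    obtain ⟨i, hi, hs⟩ := (pv_bridge cl kp.1.toList hk).mpr hin
    exact hP2 i hi kp hm hs
  -- if best < 5 it is the priority of some keyword occurring in cl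
  have key2 : best < pvTOOLS.length → ∃ kp ∈ pvKWS, kp.2 = best ∧ PySem.Chars.isIn kp.1.toList cl = true := by
    intro h
    rcases hP1 with h5 | ⟨i, hi, kp, hm, hs, he⟩
    · omega
    · exact ⟨kp, hm, he.symm,
        (PySem.Chars.exists_prefix_drop_iff_isIn kp.1.toList cl).mp
          ⟨i, (PySem.Chars.startswith_iff (cl.drop i) kp.1.toList).mp hs⟩⟩
  have hlek : ∀ (G : List String) (k : Nat),
      (G.any (fun kw => PySem.Chars.isIn kw.toList cl)) = true →
      (∀ kw ∈ G, ((kw, k) : String × Nat) ∈ pvKWS) → best ≤ k := by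
    intro G k hG hsub
    obtain ⟨kw, hkw, hin⟩ := List.any_eq_true.mp hG
    exact key1 (kw, k) (hsub kw hkw) hin
  have hnek : ∀ (G : List String) (k : Nat), k < pvTOOLS.length →
      (G.any (fun kw => PySem.Chars.isIn kw.toList cl)) = false →
      (∀ kp ∈ pvKWS, kp.2 = k → kp.1 ∈ G) → best ≠ k := by
    intro G k hklt hG hsub hbk
    obtain ⟨kp, hm, hk2, hin⟩ := key2 (by omega)
    exact absurd hin (List.any_eq_false.mp hG kp.1 (hsub kp hm (hk2.trans hbk)))
  have hlen : pvTOOLS.length = 5 := rfl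
  by_cases hG0 : (["run", "execute", "python", "code"].any (fun kw => PySem.Chars.isIn kw.toList cl)) = true
  · have h0 : best = 0 := Nat.le_zero.mp (hlek _ 0 hG0 (by decide))
    simp only [hG0, if_true, h0]
    decide
  simp only [Bool.not_eq_true] at hG0
  by_cases hG1 : (["bash", "shell", "command", "terminal"].any (fun kw => PySem.Chars.isIn kw.toList cl)) = true
  · have h1 : best = 1 := by
      have hle := hlek _ 1 hG1 (by decide)
      have n0 := hnek _ 0 (by omega) hG0 (by decide)
      omega
    simp only [hG0, hG1, h1, Bool.false_eq_true, if_true, if_false]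
    decide
  simp only [Bool.not_eq_true] at hG1
  by_cases hG2 : (["file", "read", "write", "list", "delete"].any (fun kw => PySem.Chars.isIn kw.toList cl)) = true
  · have h2 : best = 2 := by
      have hle := hlek _ 2 hG2 (by decide)
      have n0 := hnek _ 0 (by omega) hG0 (by decide)
      have n1 := hnek _ 1 (by omega) hG1 (by decide)
      omega
    simp only [hG0, hG1, hG2, h2, Bool.false_eq_true, if_true, if_false]
    decide
  simp only [Bool.not_eq_true] at hG2
  by_cases hG3 : (["analyze", "project", "structure", "dependencies"].any (fun kw => PySem.Chars.isIn kw.toList cl)) = true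
  · have h3 : best = 3 := by
      have hle := hlek _ 3 hG3 (by decide)
      have n0 := hnek _ 0 (by omega) hG0 (by decide)
      have n1 := hnek _ 1 (by omega) hG1 (by decide)
      have n2 := hnek _ 2 (by omega) hG2 (by decide)
      omega
    simp only [hG0, hG1, hG2, hG3, h3, Bool.false_eq_true, if_true, if_false]
    decide
  simp only [Bool.not_eq_true] at hG3
  by_cases hG4 : (["search", "find", "grep"].any (fun kw => PySem.Chars.isIn kw.toList cl)) = true
  · have h4 : best = 4 := by
      have hle := hlek _ 4 hG4 (by decide)
      have n0 := hnek _ 0 (by omega) hG0 (by decide)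
      have n1 := hnek _ 1 (by omega) hG1 (by decide)
      have n2 := hnek _ 2 (by omega) hG2 (by decide)
      have n3 := hnek _ 3 (by omega) hG3 (by decide)
      omega
    simp only [hG0, hG1, hG2, hG3, hG4, h4, Bool.false_eq_true, if_true, if_false]
    decide
  simp only [Bool.not_eq_true] at hG4
  have h5 : best = 5 := by
    have n0 := hnek _ 0 (by omega) hG0 (by decide)
    have n1 := hnek _ 1 (by omega) hG1 (by decide)
    have n2 := hnek _ 2 (by omega) hG2 (by decide)
    have n3 := hnek _ 3 (by omega) hG3 (by decide)
    have n4 := hnek _ 4 (by omega) hG4 (by decide)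
    omega
  simp only [hG0, hG1, hG2, hG3, hG4, h5, hlen, Bool.false_eq_true, if_false]
  decide
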